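-- pv_equiv track=rewrite | github.com/alexsolodilov/yaGPTcustom | yagptrag.py | find_relevant_sections
-- ===== SOURCE A (Python) =====
-- def find_relevant_sections(documentation, keywords, top_n=3):
--     """
--     Находит релевантные разделы документации на основе ключевых слов.
--
--     :param documentation: Список разделов документации
--     :param keywords: Список ключевых слов
--     :param top_n: Количество топ релевантных разделов для возврата
--     :return: Список релевантных разделов
--     """
--     relevance = []
--     for section in documentation:
--         text = f"{section.get('anchor_text', '')} {section.get('section_text', '')}".lower()
--         matches = sum(1 for keyword in keywords if keyword in text)
--         relevance.append((matches, section))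
--     # Сортировка по количеству совпадений
--     relevance.sort(key=lambda x: x[0], reverse=True)
--     # Выбор топ-N
--     top_sections = [section for match, section in relevance if match > 0][:top_n]
--     return top_sections
-- ===== SOURCE B (Python) =====
-- def find_relevant_sections(documentation, keywords, top_n=3):
--     """Bucket sections by keyword-match count (counting buckets) instead of sorting."""
--     buckets = {}
--     for section in documentation:
--         text = f"{section.get('anchor_text', '')} {section.get('section_text', '')}".lower()
--         matches = sum(1 for keyword in keywords if keyword in text)
--         buckets.setdefault(matches, []).append(section)
--     result = []
--     for count in reversed(range(1, len(keywords) + 1)):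
--         result.extend(buckets.get(count, []))
--     return result[:top_n]
-- ===== Notes on version B (the rewrite author's own statement) =====
-- stated objective: alternative
-- what changed: B replaces A's stable reverse sort of (count, section) pairs by a dict of buckets keyed by match count, emitted from the highest count down to 1, which also makes the match>0 filter and tie-breaking implicit.
import Mathlib
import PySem

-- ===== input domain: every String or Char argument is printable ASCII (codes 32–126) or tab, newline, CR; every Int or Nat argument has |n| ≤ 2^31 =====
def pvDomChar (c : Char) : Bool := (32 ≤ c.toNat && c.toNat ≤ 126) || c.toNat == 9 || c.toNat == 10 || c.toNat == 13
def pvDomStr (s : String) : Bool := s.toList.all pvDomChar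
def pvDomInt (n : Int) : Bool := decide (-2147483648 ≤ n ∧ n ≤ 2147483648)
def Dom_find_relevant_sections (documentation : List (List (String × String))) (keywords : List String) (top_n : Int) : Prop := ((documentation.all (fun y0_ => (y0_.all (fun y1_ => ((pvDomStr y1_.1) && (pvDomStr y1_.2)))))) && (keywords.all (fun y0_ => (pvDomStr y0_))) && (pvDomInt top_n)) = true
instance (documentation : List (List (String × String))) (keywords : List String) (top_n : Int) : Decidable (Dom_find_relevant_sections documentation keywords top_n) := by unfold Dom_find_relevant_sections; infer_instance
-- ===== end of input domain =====

-- B replaces the stable reverse sort of A by counting buckets keyed by match count (alternative algorithm, same cost); return value only — A also sorts its local list in place, which no caller observes.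


-- ===== PORT A =====
-- shared helper: text = f"{section.get('anchor_text','')} {section.get('section_text','')}".lower()
def pvText (sec : List (String × String)) : String :=
  PySem.Str.lower (((PySem.Dict.ofList sec).getD "anchor_text" "" ++ " ") ++ (PySem.Dict.ofList sec).getD "section_text" "")

-- shared helper: matches = sum(1 for keyword in keywords if keyword in text)   (identical line in A and B)
def pvScore (keywords : List String) (sec : List (String × String)) : Int :=
  (keywords.map (fun kw => if PySem.Str.isIn kw (pvText sec) then (1 : Int) else 0)).sum

def find_relevant_sections (documentation : List (List (String × String))) (keywords : List String) (top_n : Int) : List (List (String × String)) :=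
  let relevance := documentation.foldl (fun acc sec => acc ++ [(pvScore keywords sec, sec)]) []
  let sortedRel := PySem.List.sorted relevance (fun x => x.1) true
  PySem.List.slice ((sortedRel.filter (fun x => decide (0 < x.1))).map (fun x => x.2)) none (some top_n)

-- ===== PORT B =====
def find_relevant_sections_alt (documentation : List (List (String × String))) (keywords : List String) (top_n : Int) : List (List (String × String)) :=
  let buckets := documentation.foldl (fun d sec => d.modify (pvScore keywords sec) [] (fun l => l ++ [sec])) (PySem.Dict.empty)
  let result := ((PySem.List.pyRange 1 ((keywords.length : Int) + 1) 1).reverse).foldl (fun acc count => acc ++ buckets.getD count []) []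
  PySem.List.slice result none (some top_n)

-- ===== PRECONDITION & SPEC =====
def Spec_find_relevant_sections (documentation : List (List (String × String))) (keywords : List String) (top_n : Int) (out : List (List (String × String))) : Prop := out = find_relevant_sections_alt documentation keywords top_n
instance (documentation : List (List (String × String))) (keywords : List String) (top_n : Int) (out : List (List (String × String))) : Decidable (Spec_find_relevant_sections documentation keywords top_n out) := by unfold Spec_find_relevant_sections; infer_instance

-- ===== CLAIM (what is proved, stated in full; the proofs are below) =====
def Claim_equal_find_relevant_sections : Prop := ∀ (documentation : List (List (String × String))) (keywords : List String) (top_n : Int), Dom_find_relevant_sections documentation keywords top_n → Spec_find_relevant_sections documentation keywords top_n (find_relevant_sections documentation keywords top_n)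

-- ===== LEMMAS AND PROOFS =====

-- insertBy passes over a block it is not "before" any element of
theorem pv_insertBy_append {α : Type} (bef : α → α → Bool) (x : α) (ys zs : List α)
    (h : ∀ y ∈ ys, bef x y = false) :
    PySem.List.insertBy bef x (ys ++ zs) = ys ++ PySem.List.insertBy bef x zs := by
  induction ys with
  | nil => simp
  | cons a t ih =>
    simp only [List.cons_append, PySem.List.insertBy, h a (by simp)]
    simp only [Bool.false_eq_true, if_false, List.cons.injEq, true_and]
    exact ih (fun y hy => h y (by simp [hy]))

-- insertBy puts x in front of a list it is "before" every element of
theorem pv_insertBy_front {α : Type} (bef : α → α → Bool) (x : α) (zs : List α)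
    (h : ∀ y ∈ zs, bef x y = true) :
    PySem.List.insertBy bef x zs = x :: zs := by
  cases zs with
  | nil => rfl
  | cons a t => simp [PySem.List.insertBy, h a (by simp)]

-- one insertion step keeps the grouped-by-descending-key form
theorem pv_ins_step {α : Type} (x : Int × α) (l : List (Int × α)) (ds : List Int)
    (hd : ds.Pairwise (fun a b => b < a)) (hx : x.1 ∈ ds) :
    PySem.List.insertBy (fun a b => decide (b.1 < a.1)) x
        (ds.flatMap (fun c => l.filter (fun p => p.1 == c)))
      = ds.flatMap (fun c => (l ++ [x]).filter (fun p => p.1 == c)) := by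
  induction ds with
  | nil => simp at hx
  | cons c ds' ih =>
    have hlt : ∀ d ∈ ds', d < c := fun d hdm => (List.pairwise_cons.mp hd).1 d hdm
    have hd' : ds'.Pairwise (fun a b => b < a) := (List.pairwise_cons.mp hd).2
    simp only [List.flatMap_cons]
    by_cases hc : x.1 = c
    · -- x belongs to the head bucket: goes to its end
      rw [pv_insertBy_append _ _ _ _ (by
        intro y hy
        have : y.1 = c := by simpa using (List.of_mem_filter hy)
        simp [this, hc])]
      rw [pv_insertBy_front _ _ _ (by
        intro y hy
        rcases List.mem_flatMap.mp hy with ⟨d, hdm, hyf⟩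
        have h1 : y.1 = d := by simpa using (List.of_mem_filter hyf)
        have := hlt d hdm
        simp [h1, hc]; omega)]
      have hb : (l ++ [x]).filter (fun p => p.1 == c) = l.filter (fun p => p.1 == c) ++ [x] := by
        simp [List.filter_append, hc]
      rw [hb]
      have hrest : ∀ d ∈ ds', (l ++ [x]).filter (fun p => p.1 == d) = l.filter (fun p => p.1 == d) := by
        intro d hdm
        have : x.1 ≠ d := by have := hlt d hdm; omega
        simp [List.filter_append, this]
      rw [List.flatMap_congr (fun d hdm => (hrest d hdm).symm)]
      simp
    · -- x belongs to a later bucket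
      have hx' : x.1 ∈ ds' := by rcases List.mem_cons.mp hx with h | h; exact absurd h hc; exact h
      rw [pv_insertBy_append _ _ _ _ (by
        intro y hy
        have h1 : y.1 = c := by simpa using (List.of_mem_filter hy)
        have : x.1 < c := hlt _ hx'
        simp [h1]; omega)]
      rw [ih hd' hx']
      have : (l ++ [x]).filter (fun p => p.1 == c) = l.filter (fun p => p.1 == c) := by
        simp [List.filter_append, hc]
      rw [this]

-- stable reverse sort by fst = concatenation of the key buckets in descending key order
theorem pv_sorted_grouped {α : Type} (rel : List (Int × α)) (ds : List Int)
    (hd : ds.Pairwise (fun a b => b < a)) (hm : ∀ p ∈ rel, p.1 ∈ ds) :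
    PySem.List.sorted rel (fun x => x.1) true
      = ds.flatMap (fun c => rel.filter (fun p => p.1 == c)) := by
  rw [PySem.List.sorted_rev_eq_foldl_insertBy]
  induction rel using List.reverseRecOn with
  | nil => simp
  | append_singleton l x ih =>
    rw [List.foldl_append]
    simp only [List.foldl_cons, List.foldl_nil]
    rw [ih (fun p hp => hm p (by simp [hp]))]
    exact pv_ins_step x l ds hd (hm x (by simp))

-- range(1, K+1) as a mapped List.range
theorem pv_pyRange_succ (K : Nat) :
    PySem.List.pyRange 1 ((K : Int) + 1) 1 = (List.range K).map (fun i : Nat => (i : Int) + 1) := by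
  induction K with
  | zero => decide
  | succ n ih =>
    have h : ((n + 1 : Nat) : Int) + 1 = ((n : Int) + 1) + 1 := by push_cast; ring
    rw [h, PySem.List.pyRange_one_succ_right (by omega)]
    rw [ih, List.range_succ]
    simp

-- the bucket dict read back: bucket c = sections of score c, in order
theorem pv_buckets_getD (keywords : List String) (documentation : List (List (String × String))) (c : Int) :
    (documentation.foldl (fun d sec => d.modify (pvScore keywords sec) [] (fun l => l ++ [sec])) (PySem.Dict.empty)).getD c []
      = ((documentation.map (fun s => (pvScore keywords s, s))).filter (fun p : Int × List (String × String) => p.1 == c)).map (fun p => p.2) := by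
  have h : documentation.foldl (fun d sec => d.modify (pvScore keywords sec) [] (fun l => l ++ [sec])) (PySem.Dict.empty)
      = (documentation.map (fun s => (pvScore keywords s, s))).foldl (fun d p => d.modify p.1 [] (fun l => l ++ [p.2])) (PySem.Dict.empty) := by
    rw [List.foldl_map]
  rw [h, PySem.Dict.getD_foldl_modify_append]
  simp [PySem.Dict.getD_empty]

theorem pv_score_bounds (keywords : List String) (s : List (String × String)) :
    0 ≤ pvScore keywords s ∧ pvScore keywords s ≤ (keywords.length : Int) := by
  unfold pvScore
  rw [PySem.List.sum_map_ite_one_zero]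
  constructor
  · exact_mod_cast Nat.zero_le _
  · exact_mod_cast List.countP_le_length

-- ===== VERDICT (by name: the statement is the Claim_ definition above) =====
theorem find_relevant_sections_spec : Claim_equal_find_relevant_sections := by
  intro documentation keywords top_n _
  unfold Spec_find_relevant_sections find_relevant_sections find_relevant_sections_alt
  simp only [PySem.List.foldl_append_singleton_eq_map, List.nil_append]
  set rel := documentation.map (fun s => (pvScore keywords s, s)) with hrel
  -- the descending bucket order used by B, plus the zero bucket, covers every score
  set dsPos := ((List.range keywords.length).map (fun i : Nat => (i : Int) + 1)).reverse with hds
  have hdsall : (dsPos ++ [0]).Pairwise (fun a b => b < a) := by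
    rw [List.pairwise_append]
    refine ⟨?_, by simp, ?_⟩
    · rw [hds, List.pairwise_reverse]
      refine List.pairwise_map.mpr ?_
      exact List.pairwise_lt_range.imp (fun {a b} h => by omega)
    · intro a ha b hb
      simp only [List.mem_singleton] at hb
      subst hb
      rw [hds] at ha
      rcases List.mem_map.mp (List.mem_reverse.mp ha) with ⟨i, -, hi⟩
      omega
  have hmem : ∀ p ∈ rel, p.1 ∈ dsPos ++ [0] := by
    intro p hp
    rw [hrel] at hp
    rcases List.mem_map.mp hp with ⟨s, _, hs⟩
    have hb := pv_score_bounds keywords s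
    rw [← hs]
    by_cases hz : pvScore keywords s = 0
    · exact List.mem_append.mpr (Or.inr (by simp [hz]))
    · refine List.mem_append.mpr (Or.inl ?_)
      rw [hds]
      refine List.mem_reverse.mpr (List.mem_map.mpr ⟨(pvScore keywords s - 1).toNat, List.mem_range.mpr (by omega), by omega⟩)
  rw [pv_sorted_grouped rel (dsPos ++ [0]) hdsall hmem]
  -- A side: the filter keeps the positive buckets whole and empties the zero bucket
  have hfil : (( (dsPos ++ [0]).flatMap (fun c => rel.filter (fun p : Int × List (String × String) => p.1 == c)) ).filter (fun x => decide (0 < x.1)))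
      = dsPos.flatMap (fun c => rel.filter (fun p : Int × List (String × String) => p.1 == c)) := by
    rw [List.flatMap_append, List.filter_append]
    have h0 : ((([0] : List Int).flatMap (fun c => rel.filter (fun p : Int × List (String × String) => p.1 == c))).filter (fun x => decide (0 < x.1))) = [] := by
      rw [List.filter_eq_nil_iff]
      intro p hp
      simp only [List.flatMap_cons, List.flatMap_nil, List.append_nil] at hp
      have : p.1 = 0 := by simpa using (List.of_mem_filter hp)
      simp [this]
    rw [h0, List.append_nil, List.filter_eq_self]
    intro p hp
    rcases List.mem_flatMap.mp hp with ⟨c, hcm, hpf⟩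
    have h1 : p.1 = c := by simpa using (List.of_mem_filter hpf)
    rw [hds] at hcm; simp only [List.mem_reverse, List.mem_map, List.mem_range] at hcm
    rcases hcm with ⟨i, _, hi⟩
    simp [h1]; omega
  rw [hfil]
  -- B side: fold of appends = flatMap of buckets, and each bucket is a filtered map
  rw [PySem.List.foldl_append_eq_flatMap, List.nil_append, pv_pyRange_succ keywords.length]
  rw [List.flatMap_congr (fun c _ => pv_buckets_getD keywords documentation c)]
  rw [List.map_flatMap]
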